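-- pv_equiv track=rewrite | github.com/CocoRoF/Contextifier | libs/core/processor/pdf_legacy/pdf_handler_v3.py | _extract_last_category_v3
-- ===== SOURCE A (Python) =====
-- from typing import Any, Dict, List, Optional, Tuple, Set
--
-- def _extract_last_category_v3(table_data: List[List[Optional[str]]]) -> Optional[str]:
--     """테이블에서 마지막 카테고리 추출"""
--     if not table_data:
--         return None
--
--     last_category = None
--
--     for row in table_data:
--         if len(row) >= 1 and row[0] and str(row[0]).strip():
--             last_category = str(row[0]).strip()
--
--     return last_category
-- ===== SOURCE B (Python) =====
-- from typing import List, Optional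
--
-- def _extract_last_category_v3(table_data: List[List[Optional[str]]]) -> Optional[str]:
--     """테이블에서 마지막 카테고리 추출 (reverse scan, early return)"""
--     for row in reversed(table_data):
--         if len(row) >= 1 and row[0] and str(row[0]).strip():
--             return str(row[0]).strip()
--     return None
-- ===== Notes on version B (the rewrite author's own statement) =====
-- stated objective: simpler
-- what changed: Replaces the forward scan that keeps overwriting a last_category accumulator with a reverse scan that returns the first qualifying first cell immediately, eliminating the accumulator and the empty-list guard.
import Mathlib
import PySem

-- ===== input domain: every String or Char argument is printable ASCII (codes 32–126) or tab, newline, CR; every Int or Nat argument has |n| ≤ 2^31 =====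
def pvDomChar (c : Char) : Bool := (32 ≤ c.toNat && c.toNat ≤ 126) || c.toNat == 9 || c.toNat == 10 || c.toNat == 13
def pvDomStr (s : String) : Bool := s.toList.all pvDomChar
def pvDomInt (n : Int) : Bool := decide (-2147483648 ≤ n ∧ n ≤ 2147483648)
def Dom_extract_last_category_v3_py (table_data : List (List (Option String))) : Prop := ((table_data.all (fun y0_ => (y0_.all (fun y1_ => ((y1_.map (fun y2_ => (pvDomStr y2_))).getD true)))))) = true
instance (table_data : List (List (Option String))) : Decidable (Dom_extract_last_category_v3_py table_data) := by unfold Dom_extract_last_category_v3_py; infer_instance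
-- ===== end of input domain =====

-- B simplifies A: a reverse scan with early return replaces A's forward pass that
-- keeps overwriting a last_category accumulator (return value proved equal; no speed claim).

-- ===== PORT A =====
-- forward pass: for each row, if row has a first cell that is a truthy string whose
-- strip is nonempty, overwrite the accumulator with the stripped value
def extract_last_category_v3_py (table_data : List (List (Option String))) : Option String :=
  if table_data = [] then none
  else
    table_data.foldl
      (fun last_category row =>
        match row.head? with
        | some (some s) =>
          if s ≠ "" ∧ PySem.Str.strip s ≠ "" then some (PySem.Str.strip s) else last_category
        | _ => last_category)
      none

-- ===== PORT B =====
-- scan the reversed rows, returning at the first qualifying row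
def pvAltGo : List (List (Option String)) → Option String
  | [] => none
  | row :: rest =>
    match row with
    | [] => pvAltGo rest
    | none :: _ => pvAltGo rest
    | some s :: _ =>
      if s ≠ "" ∧ PySem.Str.strip s ≠ "" then some (PySem.Str.strip s) else pvAltGo rest

def extract_last_category_v3_py_alt (table_data : List (List (Option String))) : Option String :=
  pvAltGo table_data.reverse

-- ===== PRECONDITION & SPEC =====
def Spec_extract_last_category_v3_py (table_data : List (List (Option String))) (out : Option String) : Prop := out = extract_last_category_v3_py_alt table_data
instance (table_data : List (List (Option String))) (out : Option String) : Decidable (Spec_extract_last_category_v3_py table_data out) := by unfold Spec_extract_last_category_v3_py; infer_instance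

-- ===== CLAIM (what is proved, stated in full; the proofs are below) =====
def Claim_equal_extract_last_category_v3_py : Prop := ∀ (table_data : List (List (Option String))), Dom_extract_last_category_v3_py table_data → Spec_extract_last_category_v3_py table_data (extract_last_category_v3_py table_data)

-- ===== LEMMAS AND PROOFS =====

-- one loop step of A's foldl
def pvStep (last_category : Option String) (row : List (Option String)) : Option String :=
  match row.head? with
  | some (some s) =>
    if s ≠ "" ∧ PySem.Str.strip s ≠ "" then some (PySem.Str.strip s) else last_category
  | _ => last_category

lemma pvAltGo_append_singleton (xs : List (List (Option String))) (r : List (Option String)) :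
    pvAltGo (xs ++ [r]) = match pvAltGo xs with
      | some v => some v
      | none => pvStep none r := by
  induction xs with
  | nil =>
    match r with
    | [] => simp [pvAltGo, pvStep]
    | none :: _ => simp [pvAltGo, pvStep]
    | some s :: _ => by_cases h : s ≠ "" ∧ PySem.Str.strip s ≠ "" <;> simp [pvAltGo, pvStep, h]
  | cons x xs ih =>
    match x with
    | [] => simpa [pvAltGo] using ih
    | none :: _ => simpa [pvAltGo] using ih
    | some s :: _ =>
      by_cases h : s ≠ "" ∧ PySem.Str.strip s ≠ "" <;> simp [pvAltGo, h, ih] <;> split <;> simp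

lemma pvFoldl_eq_altGo_reverse (xs : List (List (Option String))) (acc : Option String) :
    xs.foldl pvStep acc = match pvAltGo xs.reverse with
      | some v => some v
      | none => acc := by
  induction xs generalizing acc with
  | nil => simp [pvAltGo]
  | cons r rs ih =>
    show rs.foldl pvStep (pvStep acc r) = _
    rw [ih, List.reverse_cons, pvAltGo_append_singleton]
    cases pvAltGo rs.reverse with
    | some v => rfl
    | none =>
      simp only
      unfold pvStep
      cases r.head? with
      | none => rfl
      | some o => cases o with
        | none => rfl
        | some s => by_cases h : s ≠ "" ∧ PySem.Str.strip s ≠ "" <;> simp [h]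

-- ===== VERDICT (by name: the statement is the Claim_ definition above) =====
theorem extract_last_category_v3_py_spec : Claim_equal_extract_last_category_v3_py := by
  intro table_data _
  show extract_last_category_v3_py table_data = extract_last_category_v3_py_alt table_data
  unfold extract_last_category_v3_py extract_last_category_v3_py_alt
  by_cases h : table_data = []
  · simp [h, pvAltGo]
  · rw [if_neg h]
    have := pvFoldl_eq_altGo_reverse table_data none
    rw [show (fun last_category row => match row.head? with
      | some (some s) =>
        if s ≠ "" ∧ PySem.Str.strip s ≠ "" then some (PySem.Str.strip s) else last_category
      | _ => last_category) = pvStep from rfl]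
    rw [this]
    cases pvAltGo table_data.reverse <;> rfl
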